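-- pv_equiv track=rewrite | github.com/googolplex23/ajidamoo | LUT_generator.py | generate_bishopwise
-- ===== SOURCE A (Python) =====
-- def generate_bishopwise(square):
--     #generate southeast positions:
--     southeast = []
--     x = square
--     lastmodx = x%8
--     while True:
--         lastmodx = x%8
--         x = x-7
--         if x%8 < lastmodx or x < 0:
--             break
--         southeast.append(x)
--
--     #generate southwest positions:
--     southwest = []
--     x = square
--     lastmodx = x%8
--     while True:
--         lastmodx = x%8
--         x = x-9
--         if x%8 > lastmodx or x < 0:
--             break
--         southwest.append(x)
--
--
--     #generate northwest positions:
--     northwest = []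
--     x = square
--     lastmodx = x%8
--     while True:
--         lastmodx = x%8
--         x = x+7
--         if x%8 > lastmodx or x > 63:
--             break
--         northwest.append(x)
--
--     #generate northeast positions:
--     northeast = []
--     x = square
--     lastmodx = x%8
--     while True:
--         lastmodx = x%8
--         x = x+9
--         if x%8 < lastmodx or x > 63:
--             break
--         northeast.append(x)
--
--
--     result = [southeast,southwest,northwest,northeast]
--     #result = [ele for ele in result if ele != []] #clear empty elements
--     #result.sort(key=len, reverse = True)
--
--     return result
-- ===== SOURCE B (Python) =====
-- def generate_bishopwise(square):
--     row, col = divmod(square, 8)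
--     southeast = [square - 7*i for i in range(1, min(row, 7-col) + 1)]
--     southwest = [square - 9*i for i in range(1, min(row, col) + 1)]
--     northwest = [square + 7*i for i in range(1, min(7-row, col) + 1)]
--     northeast = [square + 9*i for i in range(1, min(7-row, 7-col) + 1)]
--     return [southeast, southwest, northwest, northeast]
-- ===== Notes on version B (the rewrite author's own statement) =====
-- stated objective: simpler
-- what changed: Replaces the four step-by-step while loops (which walk square by square and test a mod-8 wrap each step) by closed-form diagonal lengths computed from row=square//8 and col=square%8, generating each diagonal with a single range comprehension.
import Mathlib
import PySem

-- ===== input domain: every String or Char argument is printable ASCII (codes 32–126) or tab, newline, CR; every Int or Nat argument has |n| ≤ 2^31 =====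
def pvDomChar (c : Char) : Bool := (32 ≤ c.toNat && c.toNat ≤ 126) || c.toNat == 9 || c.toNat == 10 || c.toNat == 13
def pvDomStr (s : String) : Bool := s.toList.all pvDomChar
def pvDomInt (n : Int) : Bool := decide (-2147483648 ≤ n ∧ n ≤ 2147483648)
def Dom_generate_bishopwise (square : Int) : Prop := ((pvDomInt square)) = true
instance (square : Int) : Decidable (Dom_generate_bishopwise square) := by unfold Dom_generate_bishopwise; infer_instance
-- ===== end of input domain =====

-- B replaces A's four step-until-the-edge while loops by closed-form diagonal lengths
-- (from row/col) and direct range comprehensions: objective 'simpler', same exact values.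

-- ===== PORT A =====
-- Each Python 'while True' loop steps x by a fixed offset and breaks when the file/rank
-- wraps (mod-8 comparison) or x leaves the board; that mod-8 wrap fires within at most 8
-- steps from any start, so a fuel of 8 only makes the same computation total (the
-- characterisation lemmas below prove 8 is never reached).
def pvSeLoop : Nat → Int → List Int
  | 0, _ => []
  | Nat.succ fuel, x =>
    if PySem.Int.mod (x - 7) 8 < PySem.Int.mod x 8 ∨ x - 7 < 0 then []
    else (x - 7) :: pvSeLoop fuel (x - 7)

def pvSwLoop : Nat → Int → List Int
  | 0, _ => []
  | Nat.succ fuel, x =>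
    if PySem.Int.mod (x - 9) 8 > PySem.Int.mod x 8 ∨ x - 9 < 0 then []
    else (x - 9) :: pvSwLoop fuel (x - 9)

def pvNwLoop : Nat → Int → List Int
  | 0, _ => []
  | Nat.succ fuel, x =>
    if PySem.Int.mod (x + 7) 8 > PySem.Int.mod x 8 ∨ x + 7 > 63 then []
    else (x + 7) :: pvNwLoop fuel (x + 7)

def pvNeLoop : Nat → Int → List Int
  | 0, _ => []
  | Nat.succ fuel, x =>
    if PySem.Int.mod (x + 9) 8 < PySem.Int.mod x 8 ∨ x + 9 > 63 then []
    else (x + 9) :: pvNeLoop fuel (x + 9)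

def generate_bishopwise (square : Int) : List (List Int) :=
  [pvSeLoop 8 square, pvSwLoop 8 square, pvNwLoop 8 square, pvNeLoop 8 square]

-- ===== PORT B =====
def generate_bishopwise_alt (square : Int) : List (List Int) :=
  let row := PySem.Int.floordiv square 8
  let col := PySem.Int.mod square 8
  let southeast := (PySem.List.pyRange 1 (min row (7 - col) + 1) 1).map (fun i => square - 7 * i)
  let southwest := (PySem.List.pyRange 1 (min row col + 1) 1).map (fun i => square - 9 * i)
  let northwest := (PySem.List.pyRange 1 (min (7 - row) col + 1) 1).map (fun i => square + 7 * i)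
  let northeast := (PySem.List.pyRange 1 (min (7 - row) (7 - col) + 1) 1).map (fun i => square + 9 * i)
  [southeast, southwest, northwest, northeast]

-- ===== PRECONDITION & SPEC =====
def Spec_generate_bishopwise (square : Int) (out : List (List Int)) : Prop := out = generate_bishopwise_alt square
instance (square : Int) (out : List (List Int)) : Decidable (Spec_generate_bishopwise square out) := by unfold Spec_generate_bishopwise; infer_instance

-- ===== CLAIM (what is proved, stated in full; the proofs are below) =====
def Claim_equal_generate_bishopwise : Prop := ∀ (square : Int), Dom_generate_bishopwise square → Spec_generate_bishopwise square (generate_bishopwise square)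

-- ===== LEMMAS AND PROOFS =====

-- B's 'range(1, m+1)' comprehension, rewritten as a map over List.range.
theorem pvRangeMap (m : Int) (f : Int → Int) :
    (PySem.List.pyRange 1 (m + 1) 1).map f = (List.range m.toNat).map (fun i : Nat => f ((i : Int) + 1)) := by
  rw [PySem.List.pyRange_one]
  have h : (m + 1 - 1).toNat = m.toNat := by omega
  rw [h, List.map_map]
  exact List.map_congr_left (fun i _ => by simp [add_comm])

theorem pvSeChar (n : Nat) : ∀ (fuel : Nat) (x : Int), n < fuel →
    (min (PySem.Int.floordiv x 8) (7 - PySem.Int.mod x 8)).toNat = n →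
    pvSeLoop fuel x = (List.range n).map (fun i : Nat => x - 7 * ((i : Int) + 1)) := by
  induction n with
  | zero =>
    intro fuel x hf h
    obtain ⟨f, rfl⟩ : ∃ f, fuel = f + 1 := ⟨fuel - 1, by omega⟩
    rw [pvSeLoop, if_pos]
    · simp
    · rw [PySem.Int.mod_eq_emod_of_pos (by norm_num), PySem.Int.mod_eq_emod_of_pos (by norm_num)]
      rw [PySem.Int.floordiv_eq_ediv_of_pos (by norm_num), PySem.Int.mod_eq_emod_of_pos (by norm_num)] at h
      omega
  | succ n ih =>
    intro fuel x hf h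
    obtain ⟨f, rfl⟩ : ∃ f, fuel = f + 1 := ⟨fuel - 1, by omega⟩
    rw [PySem.Int.floordiv_eq_ediv_of_pos (by norm_num), PySem.Int.mod_eq_emod_of_pos (by norm_num)] at h
    rw [pvSeLoop, if_neg]
    · rw [ih f (x - 7) (by omega) (by
        rw [PySem.Int.floordiv_eq_ediv_of_pos (by norm_num), PySem.Int.mod_eq_emod_of_pos (by norm_num)]
        omega)]
      rw [List.range_succ_eq_map, List.map_cons, List.map_map]
      refine congrArg₂ _ (by norm_num) (List.map_congr_left (fun i _ => by simp only [Function.comp_apply]; push_cast; ring))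
    · rw [PySem.Int.mod_eq_emod_of_pos (by norm_num), PySem.Int.mod_eq_emod_of_pos (by norm_num)]
      omega

theorem pvSwChar (n : Nat) : ∀ (fuel : Nat) (x : Int), n < fuel →
    (min (PySem.Int.floordiv x 8) (PySem.Int.mod x 8)).toNat = n →
    pvSwLoop fuel x = (List.range n).map (fun i : Nat => x - 9 * ((i : Int) + 1)) := by
  induction n with
  | zero =>
    intro fuel x hf h
    obtain ⟨f, rfl⟩ : ∃ f, fuel = f + 1 := ⟨fuel - 1, by omega⟩
    rw [pvSwLoop, if_pos]
    · simp
    · rw [PySem.Int.mod_eq_emod_of_pos (by norm_num), PySem.Int.mod_eq_emod_of_pos (by norm_num)]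
      rw [PySem.Int.floordiv_eq_ediv_of_pos (by norm_num), PySem.Int.mod_eq_emod_of_pos (by norm_num)] at h
      omega
  | succ n ih =>
    intro fuel x hf h
    obtain ⟨f, rfl⟩ : ∃ f, fuel = f + 1 := ⟨fuel - 1, by omega⟩
    rw [PySem.Int.floordiv_eq_ediv_of_pos (by norm_num), PySem.Int.mod_eq_emod_of_pos (by norm_num)] at h
    rw [pvSwLoop, if_neg]
    · rw [ih f (x - 9) (by omega) (by
        rw [PySem.Int.floordiv_eq_ediv_of_pos (by norm_num), PySem.Int.mod_eq_emod_of_pos (by norm_num)]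
        omega)]
      rw [List.range_succ_eq_map, List.map_cons, List.map_map]
      refine congrArg₂ _ (by norm_num) (List.map_congr_left (fun i _ => by simp only [Function.comp_apply]; push_cast; ring))
    · rw [PySem.Int.mod_eq_emod_of_pos (by norm_num), PySem.Int.mod_eq_emod_of_pos (by norm_num)]
      omega

theorem pvNwChar (n : Nat) : ∀ (fuel : Nat) (x : Int), n < fuel →
    (min (7 - PySem.Int.floordiv x 8) (PySem.Int.mod x 8)).toNat = n →
    pvNwLoop fuel x = (List.range n).map (fun i : Nat => x + 7 * ((i : Int) + 1)) := by
  induction n with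
  | zero =>
    intro fuel x hf h
    obtain ⟨f, rfl⟩ : ∃ f, fuel = f + 1 := ⟨fuel - 1, by omega⟩
    rw [pvNwLoop, if_pos]
    · simp
    · rw [PySem.Int.mod_eq_emod_of_pos (by norm_num), PySem.Int.mod_eq_emod_of_pos (by norm_num)]
      rw [PySem.Int.floordiv_eq_ediv_of_pos (by norm_num), PySem.Int.mod_eq_emod_of_pos (by norm_num)] at h
      omega
  | succ n ih =>
    intro fuel x hf h
    obtain ⟨f, rfl⟩ : ∃ f, fuel = f + 1 := ⟨fuel - 1, by omega⟩
    rw [PySem.Int.floordiv_eq_ediv_of_pos (by norm_num), PySem.Int.mod_eq_emod_of_pos (by norm_num)] at h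
    rw [pvNwLoop, if_neg]
    · rw [ih f (x + 7) (by omega) (by
        rw [PySem.Int.floordiv_eq_ediv_of_pos (by norm_num), PySem.Int.mod_eq_emod_of_pos (by norm_num)]
        omega)]
      rw [List.range_succ_eq_map, List.map_cons, List.map_map]
      refine congrArg₂ _ (by norm_num) (List.map_congr_left (fun i _ => by simp only [Function.comp_apply]; push_cast; ring))
    · rw [PySem.Int.mod_eq_emod_of_pos (by norm_num), PySem.Int.mod_eq_emod_of_pos (by norm_num)]
      omega

theorem pvNeChar (n : Nat) : ∀ (fuel : Nat) (x : Int), n < fuel →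
    (min (7 - PySem.Int.floordiv x 8) (7 - PySem.Int.mod x 8)).toNat = n →
    pvNeLoop fuel x = (List.range n).map (fun i : Nat => x + 9 * ((i : Int) + 1)) := by
  induction n with
  | zero =>
    intro fuel x hf h
    obtain ⟨f, rfl⟩ : ∃ f, fuel = f + 1 := ⟨fuel - 1, by omega⟩
    rw [pvNeLoop, if_pos]
    · simp
    · rw [PySem.Int.mod_eq_emod_of_pos (by norm_num), PySem.Int.mod_eq_emod_of_pos (by norm_num)]
      rw [PySem.Int.floordiv_eq_ediv_of_pos (by norm_num), PySem.Int.mod_eq_emod_of_pos (by norm_num)] at h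
      omega
  | succ n ih =>
    intro fuel x hf h
    obtain ⟨f, rfl⟩ : ∃ f, fuel = f + 1 := ⟨fuel - 1, by omega⟩
    rw [PySem.Int.floordiv_eq_ediv_of_pos (by norm_num), PySem.Int.mod_eq_emod_of_pos (by norm_num)] at h
    rw [pvNeLoop, if_neg]
    · rw [ih f (x + 9) (by omega) (by
        rw [PySem.Int.floordiv_eq_ediv_of_pos (by norm_num), PySem.Int.mod_eq_emod_of_pos (by norm_num)]
        omega)]
      rw [List.range_succ_eq_map, List.map_cons, List.map_map]
      refine congrArg₂ _ (by norm_num) (List.map_congr_left (fun i _ => by simp only [Function.comp_apply]; push_cast; ring))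
    · rw [PySem.Int.mod_eq_emod_of_pos (by norm_num), PySem.Int.mod_eq_emod_of_pos (by norm_num)]
      omega

-- ===== VERDICT (by name: the statement is the Claim_ definition above) =====
theorem generate_bishopwise_spec : Claim_equal_generate_bishopwise := by
  intro square _
  have hr := PySem.Int.floordiv_eq_ediv_of_pos (a := square) (b := 8) (by norm_num)
  have hc := PySem.Int.mod_eq_emod_of_pos (a := square) (b := 8) (by norm_num)
  unfold Spec_generate_bishopwise generate_bishopwise generate_bishopwise_alt
  simp only
  rw [pvRangeMap, pvRangeMap, pvRangeMap, pvRangeMap,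
    pvSeChar _ 8 square (by rw [hr, hc]; omega) rfl,
    pvSwChar _ 8 square (by rw [hr, hc]; omega) rfl,
    pvNwChar _ 8 square (by rw [hr, hc]; omega) rfl,
    pvNeChar _ 8 square (by rw [hr, hc]; omega) rfl]
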